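-- pv_equiv track=rewrite | github.com/giga3132/causal-relation-extraction | src/models/baseline.py | parse_sentence
-- ===== SOURCE A (Python) =====
-- def parse_sentence(sentence):
--     """Extract tokens and entity spans from SemEval formatted sentences."""
--
--     tokens = []
--     e1s = e1e = e2s = e2e = None
--
--     temp = sentence
--     temp = temp.replace('<e1>', ' <e1> ').replace('</e1>', ' </e1> ')
--     temp = temp.replace('<e2>', ' <e2> ').replace('</e2>', ' </e2> ')
--
--     raw_tokens = temp.split()
--
--     for tok in raw_tokens:
--         if tok == '<e1>':
--             e1s = len(tokens)
--         elif tok == '</e1>':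
--             e1e = len(tokens) - 1
--         elif tok == '<e2>':
--             e2s = len(tokens)
--         elif tok == '</e2>':
--             e2e = len(tokens) - 1
--         else:
--             tokens.append(tok.lower())
--
--     return tokens, (e1s, e1e), (e2s, e2e)
-- ===== SOURCE B (Python) =====
-- MARKERS = ('<e1>', '</e1>', '<e2>', '</e2>')
--
--
-- def parse_sentence(sentence):
--     """Extract tokens and entity spans from SemEval formatted sentences."""
--     temp = sentence
--     temp = temp.replace('<e1>', ' <e1> ').replace('</e1>', ' </e1> ')
--     temp = temp.replace('<e2>', ' <e2> ').replace('</e2>', ' </e2> ')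
--     raw = temp.split()
--
--     tokens = [t.lower() for t in raw if t not in MARKERS]
--
--     def span(tag, closing):
--         idx = None
--         for i, t in enumerate(raw):
--             if t == tag:
--                 idx = i
--         if idx is None:
--             return None
--         skip = len([t for t in raw[:idx] if t in MARKERS])
--         return idx - skip - (1 if closing else 0)
--
--     return tokens, (span('<e1>', False), span('</e1>', True)), \
--         (span('<e2>', False), span('</e2>', True))
-- ===== Notes on version B (the rewrite author's own statement) =====
-- stated objective: alternative
-- what changed: Instead of one stateful loop that overwrites four span variables while building the token list, B builds the token list by a filter+map and computes each span arithmetically from the last raw position of the tag minus the number of marker tokens before it (minus one for closing tags).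
import Mathlib
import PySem

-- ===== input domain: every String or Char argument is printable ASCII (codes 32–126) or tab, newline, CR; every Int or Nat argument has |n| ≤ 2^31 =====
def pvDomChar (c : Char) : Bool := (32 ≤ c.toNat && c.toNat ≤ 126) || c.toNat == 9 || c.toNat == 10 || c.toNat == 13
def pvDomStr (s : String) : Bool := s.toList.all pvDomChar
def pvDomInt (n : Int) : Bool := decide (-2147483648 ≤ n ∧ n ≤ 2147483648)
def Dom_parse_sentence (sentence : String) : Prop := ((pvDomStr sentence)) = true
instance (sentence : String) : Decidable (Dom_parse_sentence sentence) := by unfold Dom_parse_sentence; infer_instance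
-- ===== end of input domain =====

-- B replaces A's stateful marker loop by a filter+map token list and an arithmetic
-- span computation (last raw index of the tag minus markers before it); alternative decomposition, same cost.

-- ===== PORT A =====
def psAStep (st : List String × Option Int × Option Int × Option Int × Option Int) (tok : String) :
    List String × Option Int × Option Int × Option Int × Option Int :=
  if tok = "<e1>" then (st.1, some (PySem.List.len st.1), st.2.2)
  else if tok = "</e1>" then (st.1, st.2.1, some (PySem.List.len st.1 - 1), st.2.2.2)
  else if tok = "<e2>" then (st.1, st.2.1, st.2.2.1, some (PySem.List.len st.1), st.2.2.2.2)
  else if tok = "</e2>" then (st.1, st.2.1, st.2.2.1, st.2.2.2.1, some (PySem.List.len st.1 - 1))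
  else (st.1 ++ [PySem.Str.lower tok], st.2)

def parse_sentence (sentence : String) :
    List String × (Option Int × Option Int) × (Option Int × Option Int) :=
  let temp := sentence
  let temp := PySem.Str.replace (PySem.Str.replace temp "<e1>" " <e1> ") "</e1>" " </e1> "
  let temp := PySem.Str.replace (PySem.Str.replace temp "<e2>" " <e2> ") "</e2>" " </e2> "
  let raw_tokens := PySem.Str.split₀ temp
  let st := raw_tokens.foldl psAStep ([], none, none, none, none)
  (st.1, (st.2.1, st.2.2.1), (st.2.2.2.1, st.2.2.2.2))

-- ===== PORT B =====
def pbMarkers : List String := ["<e1>", "</e1>", "<e2>", "</e2>"]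

def pbIsMarker (t : String) : Bool := decide (t ∈ pbMarkers)

-- 'idx = None; for i, t in enumerate(raw): if t == tag: idx = i'
def pbLastIdx (raw : List String) (tag : String) : Option Int :=
  (PySem.List.enumerate raw 0).foldl (fun acc p => if p.2 = tag then some p.1 else acc) none

def pbSpan (raw : List String) (tag : String) (closing : Bool) : Option Int :=
  match pbLastIdx raw tag with
  | none => none
  | some idx =>
      let skip := ((PySem.List.slice raw none (some idx)).filter pbIsMarker).length
      some (idx - skip - (if closing then 1 else 0))

def parse_sentence_alt (sentence : String) :
    List String × (Option Int × Option Int) × (Option Int × Option Int) :=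
  let temp := sentence
  let temp := PySem.Str.replace (PySem.Str.replace temp "<e1>" " <e1> ") "</e1>" " </e1> "
  let temp := PySem.Str.replace (PySem.Str.replace temp "<e2>" " <e2> ") "</e2>" " </e2> "
  let raw := PySem.Str.split₀ temp
  let tokens := (raw.filter (fun t => !pbIsMarker t)).map PySem.Str.lower
  (tokens, (pbSpan raw "<e1>" false, pbSpan raw "</e1>" true),
    (pbSpan raw "<e2>" false, pbSpan raw "</e2>" true))

-- ===== PRECONDITION & SPEC =====
def Spec_parse_sentence (sentence : String) (out : List String × (Option Int × Option Int) × (Option Int × Option Int)) : Prop := out = parse_sentence_alt sentence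
instance (sentence : String) (out : List String × (Option Int × Option Int) × (Option Int × Option Int)) : Decidable (Spec_parse_sentence sentence out) := by unfold Spec_parse_sentence; infer_instance

-- ===== CLAIM (what is proved, stated in full; the proofs are below) =====
def Claim_equal_parse_sentence : Prop := ∀ (sentence : String), Dom_parse_sentence sentence → Spec_parse_sentence sentence (parse_sentence sentence)

-- ===== LEMMAS AND PROOFS =====

theorem pbLastIdx_append (xs : List String) (x tag : String) :
    pbLastIdx (xs ++ [x]) tag =
      if x = tag then some (xs.length : Int) else pbLastIdx xs tag := by
  unfold pbLastIdx
  rw [PySem.List.enumerate_append, List.foldl_append]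
  simp [PySem.List.enumerate_cons, PySem.List.enumerate_nil]

theorem pbLastIdx_bound (xs : List String) (tag : String) (i : Int)
    (h : pbLastIdx xs tag = some i) : ∃ n : Nat, i = (n : Int) ∧ n < xs.length := by
  induction xs using List.reverseRecOn with
  | nil => simp [pbLastIdx, PySem.List.enumerate_nil] at h
  | append_singleton xs x ih =>
      rw [pbLastIdx_append] at h
      by_cases hx : x = tag
      · simp [hx] at h
        exact ⟨xs.length, by omega, by simp⟩
      · simp [hx] at h
        obtain ⟨n, hn, hlt⟩ := ih h
        exact ⟨n, hn, by simp; omega⟩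

theorem pbSpan_append_of_ne (xs : List String) (x tag : String) (c : Bool)
    (hx : x ≠ tag) : pbSpan (xs ++ [x]) tag c = pbSpan xs tag c := by
  unfold pbSpan
  rw [pbLastIdx_append, if_neg hx]
  cases h : pbLastIdx xs tag with
  | none => rfl
  | some i =>
      obtain ⟨n, rfl, hlt⟩ := pbLastIdx_bound xs tag i h
      simp only [PySem.List.slice_to_natCast, List.take_append_of_le_length (Nat.le_of_lt hlt)]

theorem pbSpan_append_self (xs : List String) (x : String) (c : Bool) :
    pbSpan (xs ++ [x]) x c =
      some ((((xs.filter (fun t => !pbIsMarker t)).length : Int)) - (if c then 1 else 0)) := by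
  unfold pbSpan
  rw [pbLastIdx_append, if_pos rfl]
  simp only [PySem.List.slice_to_natCast, List.take_append_of_le_length (le_refl xs.length),
    List.take_length]
  have hcount : xs.length = (xs.filter pbIsMarker).length + (xs.filter (fun t => !pbIsMarker t)).length :=
    List.length_eq_length_filter_add pbIsMarker
  simp only [Option.some.injEq]
  omega

-- the marker tokens, as equations on pbIsMarker
theorem pbIsMarker_e1o : pbIsMarker "<e1>" = true := by decide
theorem pbIsMarker_e1c : pbIsMarker "</e1>" = true := by decide
theorem pbIsMarker_e2o : pbIsMarker "<e2>" = true := by decide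
theorem pbIsMarker_e2c : pbIsMarker "</e2>" = true := by decide

-- the A-side fold, characterised field by field by B's quantities
theorem psA_fold_char (raw : List String) :
    raw.foldl psAStep ([], none, none, none, none) =
      ((raw.filter (fun t => !pbIsMarker t)).map PySem.Str.lower,
        pbSpan raw "<e1>" false, pbSpan raw "</e1>" true,
        pbSpan raw "<e2>" false, pbSpan raw "</e2>" true) := by
  induction raw using List.reverseRecOn with
  | nil => simp [pbSpan, pbLastIdx, PySem.List.enumerate_nil]
  | append_singleton xs x ih =>
    rw [List.foldl_append, ih]
    by_cases h1 : x = "<e1>"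
    · subst h1
      rw [pbSpan_append_self xs "<e1>" false,
          pbSpan_append_of_ne xs "<e1>" "</e1>" true (by decide),
          pbSpan_append_of_ne xs "<e1>" "<e2>" false (by decide),
          pbSpan_append_of_ne xs "<e1>" "</e2>" true (by decide)]
      simp [psAStep, PySem.List.len_eq, pbIsMarker_e1o]
    by_cases h2 : x = "</e1>"
    · subst h2
      rw [pbSpan_append_self xs "</e1>" true,
          pbSpan_append_of_ne xs "</e1>" "<e1>" false (by decide),
          pbSpan_append_of_ne xs "</e1>" "<e2>" false (by decide),
          pbSpan_append_of_ne xs "</e1>" "</e2>" true (by decide)]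
      simp [psAStep, PySem.List.len_eq, pbIsMarker_e1c]
    by_cases h3 : x = "<e2>"
    · subst h3
      rw [pbSpan_append_self xs "<e2>" false,
          pbSpan_append_of_ne xs "<e2>" "<e1>" false (by decide),
          pbSpan_append_of_ne xs "<e2>" "</e1>" true (by decide),
          pbSpan_append_of_ne xs "<e2>" "</e2>" true (by decide)]
      simp [psAStep, PySem.List.len_eq, pbIsMarker_e2o]
    by_cases h4 : x = "</e2>"
    · subst h4
      rw [pbSpan_append_self xs "</e2>" true,
          pbSpan_append_of_ne xs "</e2>" "<e1>" false (by decide),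
          pbSpan_append_of_ne xs "</e2>" "</e1>" true (by decide),
          pbSpan_append_of_ne xs "</e2>" "<e2>" false (by decide)]
      simp [psAStep, PySem.List.len_eq, pbIsMarker_e2c]
    have hm : pbIsMarker x = false := by
      simp [pbIsMarker, pbMarkers, h1, h2, h3, h4]
    rw [pbSpan_append_of_ne xs x "<e1>" false h1,
        pbSpan_append_of_ne xs x "</e1>" true h2,
        pbSpan_append_of_ne xs x "<e2>" false h3,
        pbSpan_append_of_ne xs x "</e2>" true h4]
    simp [psAStep, h1, h2, h3, h4, hm]

-- ===== VERDICT (by name: the statement is the Claim_ definition above) =====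
theorem parse_sentence_spec : Claim_equal_parse_sentence := by
  intro sentence _
  unfold Spec_parse_sentence parse_sentence parse_sentence_alt
  simp only [psA_fold_char]
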